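-- pv_equiv track=rewrite | github.com/yramachers/pySNemo | python/pysnemo/utility/unique.py | unique_hit_assignment
-- ===== SOURCE A (Python) =====
-- def unique_hit_assignment(tracks):
--     '''Perform unique allocation of hits to the
--     longest track in which they appear.
--     This is done by sorting the tracks by length,
--     then filtering the hits in the shortest, leaving only
--     those which are not in any other track.
--     '''
--     sorted_tracks = sorted(tracks, key=lambda x: len(x),
--             reverse=True) # Reversed, since pop() operates on the end of a list
--     new_tracks = [ ]
--     while len(sorted_tracks):
--         current_track = sorted_tracks.pop()
--         new_track = [ ]
--         for hit in current_track:
--             if not _hit_in_one_of(hit, sorted_tracks):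
--                 # Have unique hit
--                 new_track.append(hit)
--         if len(new_track):
--             # Have something in this track
--             new_tracks.append(new_track)
--     return new_tracks
--
-- def _hit_in_one_of(hit, tracks):
--     '''Return True if the hit is in one
--     of the tracks given, otherwise return
--     False.
--     '''
--     for track in tracks:
--         if hit in track:
--             return True
--     return False
-- ===== SOURCE B (Python) =====
-- def unique_hit_assignment(tracks):
--     """One pass over the tracks sorted longest-first, with a running set of
--     hits already seen in longer tracks; reverse at the end to get A's
--     shortest-first output order."""
--     seen = set()
--     out = []
--     for track in sorted(tracks, key=len, reverse=True):
--         new_track = [h for h in track if h not in seen]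
--         seen.update(track)
--         if new_track:
--             out.append(new_track)
--     out.reverse()
--     return out
-- ===== Notes on version B (the rewrite author's own statement) =====
-- stated objective: faster
-- what changed: A re-scans all remaining tracks for every hit of every track; B makes one longest-first pass keeping a running set of already-seen hits, filtering each track against that set and reversing the collected output at the end.
import Mathlib
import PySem

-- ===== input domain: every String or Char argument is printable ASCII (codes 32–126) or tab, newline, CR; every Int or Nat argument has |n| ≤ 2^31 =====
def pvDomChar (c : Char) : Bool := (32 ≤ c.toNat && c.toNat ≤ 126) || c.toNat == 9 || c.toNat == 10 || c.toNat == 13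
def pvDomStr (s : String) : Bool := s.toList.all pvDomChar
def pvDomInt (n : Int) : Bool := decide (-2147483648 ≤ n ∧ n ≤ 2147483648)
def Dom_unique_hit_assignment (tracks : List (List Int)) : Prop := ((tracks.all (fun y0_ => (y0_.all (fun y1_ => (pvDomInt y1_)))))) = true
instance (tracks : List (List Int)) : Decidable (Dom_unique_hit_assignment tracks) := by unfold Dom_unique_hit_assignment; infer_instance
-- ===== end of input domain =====

-- B replaces A's quadratic membership scan over the remaining tracks by a single
-- longest-first pass with a running set of already-seen hits (objective: faster).

-- ===== PORT A =====
-- _hit_in_one_of(hit, tracks)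
def hitInOneOf (hit : Int) (tracks : List (List Int)) : Bool :=
  match tracks with
  | [] => false
  | t :: rest => if t.contains hit then true else hitInOneOf hit rest

-- the 'while len(sorted_tracks)' loop: pop() from the end, filter, append if nonempty
def uhaLoop (st : List (List Int)) (acc : List (List Int)) : List (List Int) :=
  if _h : st.isEmpty then acc
  else
    let current := st.getLastD []
    let rest := st.dropLast
    let nt := current.filter (fun hit => !(hitInOneOf hit rest))
    uhaLoop rest (if nt.isEmpty then acc else acc ++ [nt])
termination_by st.length
decreasing_by
  cases st with
  | nil => simp at _h
  | cons a l => simp [List.length_dropLast]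

def unique_hit_assignment (tracks : List (List Int)) : List (List Int) :=
  uhaLoop (PySem.List.sorted tracks (fun x => x.length) true) []

-- ===== PORT B =====
-- one iteration of B's for-loop: filter against seen, then seen.update(track)
def altStep (p : PySem.Set Int × List (List Int)) (track : List Int) : PySem.Set Int × List (List Int) :=
  (PySem.Set.update p.1 track,
   if (track.filter (fun h => !(PySem.Set.contains p.1 h))).isEmpty then p.2
   else p.2 ++ [track.filter (fun h => !(PySem.Set.contains p.1 h))])

def unique_hit_assignment_alt (tracks : List (List Int)) : List (List Int) :=
  ((PySem.List.sorted tracks (fun x => x.length) true).foldl altStep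
    (PySem.Set.empty, [])).2.reverse

-- ===== PRECONDITION & SPEC =====
def Spec_unique_hit_assignment (tracks : List (List Int)) (out : List (List Int)) : Prop := out = unique_hit_assignment_alt tracks
instance (tracks : List (List Int)) (out : List (List Int)) : Decidable (Spec_unique_hit_assignment tracks out) := by unfold Spec_unique_hit_assignment; infer_instance

-- ===== CLAIM (what is proved, stated in full; the proofs are below) =====
def Claim_equal_unique_hit_assignment : Prop := ∀ (tracks : List (List Int)), Dom_unique_hit_assignment tracks → Spec_unique_hit_assignment tracks (unique_hit_assignment tracks)

-- ===== LEMMAS AND PROOFS =====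

-- pure recursive description of B's fold: kept (nonempty, filtered) tracks in order
def procB (l : List (List Int)) (s : PySem.Set Int) : List (List Int) :=
  match l with
  | [] => []
  | t :: r =>
    (if (t.filter (fun h => !(PySem.Set.contains s h))).isEmpty then []
     else [t.filter (fun h => !(PySem.Set.contains s h))]) ++ procB r (PySem.Set.update s t)

lemma procB_cons (t : List Int) (r : List (List Int)) (s : PySem.Set Int) :
    procB (t :: r) s
      = (if (t.filter (fun h => !(PySem.Set.contains s h))).isEmpty then []
         else [t.filter (fun h => !(PySem.Set.contains s h))]) ++ procB r (PySem.Set.update s t) := rfl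

lemma foldl_eq_procB (l : List (List Int)) (s : PySem.Set Int) (out : List (List Int)) :
    (l.foldl altStep (s, out)).2 = out ++ procB l s := by
  induction l generalizing s out with
  | nil => simp [procB]
  | cons t r ih =>
      rw [List.foldl_cons]
      by_cases h : (t.filter (fun h => !(PySem.Set.contains s h))).isEmpty
      · have hstep : altStep (s, out) t = (PySem.Set.update s t, out) := by
          unfold altStep; rw [if_pos h]
        rw [hstep, ih, procB_cons, if_pos h]
        simp
      · have hstep : altStep (s, out) t
            = (PySem.Set.update s t, out ++ [t.filter (fun h => !(PySem.Set.contains s h))]) := by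
          unfold altStep; rw [if_neg h]
        rw [hstep, ih, procB_cons, if_neg h]
        simp

-- running seen-set membership = A's membership scan
lemma seen_contains (l : List (List Int)) (s : PySem.Set Int) (x : Int) :
    PySem.Set.contains (l.foldl (fun s t => PySem.Set.update s t) s) x
      = (PySem.Set.contains s x || hitInOneOf x l) := by
  induction l generalizing s with
  | nil => simp [hitInOneOf]
  | cons t r ih =>
      simp only [List.foldl_cons, ih, hitInOneOf]
      have : PySem.Set.contains (PySem.Set.update s t) x
          = (PySem.Set.contains s x || t.contains x) := by
        by_cases h : x ∈ PySem.Set.update s t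
        · have := (PySem.Set.mem_update (s := s) (xs := t) (y := x)).mp h
          simp only [PySem.Set.contains_eq_listContains]
          rcases this with h' | h' <;> simp [h, h']
        · rw [PySem.Set.mem_update] at h
          push Not at h
          simp only [PySem.Set.contains_eq_listContains]
          simp [h.1, h.2]
      rw [this]
      simp [Bool.or_comm, Bool.or_assoc]
  
lemma procB_concat (l : List (List Int)) (t : List Int) (s : PySem.Set Int) :
    procB (l ++ [t]) s
      = procB l s ++
        (let nt := t.filter (fun h => !(PySem.Set.contains (l.foldl (fun s t => PySem.Set.update s t) s) h))
         if nt.isEmpty then [] else [nt]) := by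
  induction l generalizing s with
  | nil => simp [procB]
  | cons a r ih => rw [List.cons_append, procB_cons, procB_cons, ih, List.foldl_cons, List.append_assoc]

lemma uhaLoop_eq (l : List (List Int)) (acc : List (List Int)) :
    uhaLoop l acc = acc ++ (procB l PySem.Set.empty).reverse := by
  induction l using List.reverseRecOn generalizing acc with
  | nil => unfold uhaLoop; simp [procB]
  | append_singleton r t ih =>
      rw [uhaLoop, dif_neg (by simp)]
      simp only [List.getLastD_concat, List.dropLast_concat]
      rw [ih, procB_concat]
      have hpred : t.filter (fun h => !(PySem.Set.contains (r.foldl (fun s t => PySem.Set.update s t) PySem.Set.empty) h))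
          = t.filter (fun hit => !(hitInOneOf hit r)) := by
        apply List.filter_congr
        intro a _
        rw [seen_contains]
        simp [PySem.Set.empty]
      simp only [hpred]
      by_cases hnt : (t.filter (fun hit => !(hitInOneOf hit r))).isEmpty <;>
        simp [hnt]
-- ===== VERDICT (by name: the statement is the Claim_ definition above) =====
theorem unique_hit_assignment_spec : Claim_equal_unique_hit_assignment := by
  intro tracks _
  unfold Spec_unique_hit_assignment unique_hit_assignment unique_hit_assignment_alt
  rw [uhaLoop_eq, foldl_eq_procB]
  simp
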